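-- pv_equiv track=rewrite | github.com/ElofssonLab/evolutionary_rates | above2.py | get_passed_uids
-- ===== SOURCE A (Python) =====
-- def get_passed_uids(failed_pdb_filter, sequences, H_groups):
--     '''Get the uids that passed the pdb filter and group them
--     '''
--
--     #Get passed uids
--     failed_uids = [*failed_pdb_filter[0]]
--     passed_uids = []
--     for uid in sequences:
--         if uid in failed_uids:
--             continue
--         else:
--             passed_uids.append(uid)
--
--     #Group the passed uids by H-group
--     passed_uids_grouped = {} #Sequences grouped by H-group
--     for uid in passed_uids:
--         H_group = H_groups[uid]
--         if H_group not in passed_uids_grouped.keys(): #If not in new dict - add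
--             passed_uids_grouped[H_group] = [uid]
--         else:
--             passed_uids_grouped[H_group].append(uid) #Otherwise append
--
--
--     return passed_uids_grouped
-- ===== SOURCE B (Python) =====
-- def get_passed_uids(failed_pdb_filter, sequences, H_groups):
--     '''Get the uids that passed the pdb filter and group them
--     '''
--     failed_uids = failed_pdb_filter[0]
--     # First pass: the H-groups of surviving uids, in order of first appearance
--     group_order = []
--     for uid in sequences:
--         if uid not in failed_uids:
--             H_group = H_groups[uid]
--             if H_group not in group_order:
--                 group_order.append(H_group)
--     # One bucket per group, filled by selecting its members from sequences
--     return {g: [uid for uid in sequences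
--                 if uid not in failed_uids and H_groups[uid] == g]
--             for g in group_order}
-- ===== Notes on version B (the rewrite author's own statement) =====
-- stated objective: alternative
-- what changed: Replaces A's incremental grouping (filter pass building passed_uids, then a loop appending each uid into a growing bucket dict) by a per-group selection: one pass collects the distinct H-groups of survivors in first-appearance order, then each group's bucket is built by its own filtered comprehension over sequences.
import Mathlib
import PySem

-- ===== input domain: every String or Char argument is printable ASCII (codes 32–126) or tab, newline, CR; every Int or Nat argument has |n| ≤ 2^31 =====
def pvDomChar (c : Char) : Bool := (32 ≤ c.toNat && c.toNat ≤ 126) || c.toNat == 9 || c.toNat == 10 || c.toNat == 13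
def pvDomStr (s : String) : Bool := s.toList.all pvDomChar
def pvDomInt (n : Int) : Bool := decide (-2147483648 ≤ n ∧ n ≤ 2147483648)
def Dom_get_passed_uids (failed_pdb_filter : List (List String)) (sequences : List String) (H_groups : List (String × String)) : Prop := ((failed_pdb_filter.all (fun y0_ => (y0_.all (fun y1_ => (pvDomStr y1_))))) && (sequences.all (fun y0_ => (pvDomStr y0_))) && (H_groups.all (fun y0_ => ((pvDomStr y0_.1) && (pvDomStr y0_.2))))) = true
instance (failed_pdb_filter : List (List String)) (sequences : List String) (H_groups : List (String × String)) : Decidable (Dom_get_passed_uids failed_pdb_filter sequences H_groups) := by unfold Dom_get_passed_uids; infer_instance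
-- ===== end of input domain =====

-- B replaces A's incremental bucket dict with a different decomposition: a first pass collects the
-- H-groups of survivors in first-appearance order, then each bucket is built by its own selection
-- over sequences; objective: alternative (per-group selection instead of incremental grouping).

-- ===== PORT A =====
def get_passed_uids (failed_pdb_filter : List (List String)) (sequences : List String) (H_groups : List (String × String)) : List (String × List String) :=
  -- failed_uids = [*failed_pdb_filter[0]]  (Pre_ excludes failed_pdb_filter = [], where Python raises IndexError)
  let failed_uids : List String := PySem.List.pyGetD failed_pdb_filter 0 []
  -- first loop: passed_uids
  let passed_uids : List String :=
    sequences.foldl (fun acc uid => if failed_uids.contains uid then acc else acc ++ [uid]) []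
  -- second loop: group by H_group = H_groups[uid]  (Pre_ excludes a missing key, where Python raises KeyError)
  let grouped : PySem.Dict String (List String) :=
    passed_uids.foldl (fun d uid =>
      let H_group := (PySem.Dict.mk H_groups).getD uid ""
      if !((PySem.Dict.keys d).contains H_group) then d.insert H_group [uid]
      else d.modify H_group [] (· ++ [uid])) PySem.Dict.empty
  grouped.items

-- ===== PORT B =====
def get_passed_uids_alt (failed_pdb_filter : List (List String)) (sequences : List String) (H_groups : List (String × String)) : List (String × List String) :=
  let failed_uids : List String := PySem.List.pyGetD failed_pdb_filter 0 []
  -- first pass: H-groups of surviving uids, in order of first appearance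
  let group_order : List String :=
    sequences.foldl (fun ks uid =>
      if !(failed_uids.contains uid) then
        let H_group := (PySem.Dict.mk H_groups).getD uid ""
        if !(ks.contains H_group) then ks ++ [H_group] else ks
      else ks) []
  -- dict comprehension: one filtered selection over sequences per group
  group_order.map (fun g =>
    (g, sequences.filter (fun uid =>
          !(failed_uids.contains uid) && ((PySem.Dict.mk H_groups).getD uid "" == g))))

-- ===== PRECONDITION & SPEC =====
-- Pre_ excludes exactly the inputs where Python A raises: an empty failed_pdb_filter
-- (IndexError on failed_pdb_filter[0]) and a surviving uid absent from H_groups (KeyError).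
def Pre_get_passed_uids (failed_pdb_filter : List (List String)) (sequences : List String) (H_groups : List (String × String)) : Prop :=
  failed_pdb_filter ≠ [] ∧
  ∀ uid ∈ sequences, uid ∈ failed_pdb_filter.headD [] ∨ uid ∈ H_groups.map Prod.fst
instance (failed_pdb_filter : List (List String)) (sequences : List String) (H_groups : List (String × String)) : Decidable (Pre_get_passed_uids failed_pdb_filter sequences H_groups) := by unfold Pre_get_passed_uids; infer_instance

def pvWitness_get_passed_uids : List (List String) × List String × (List (String × String)) :=
  ([["u1"]], ["u1", "u2", "u3", "u2"], [("u2", "g1"), ("u3", "g2")])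

def Spec_get_passed_uids (failed_pdb_filter : List (List String)) (sequences : List String) (H_groups : List (String × String)) (out : List (String × List String)) : Prop := out = get_passed_uids_alt failed_pdb_filter sequences H_groups
instance (failed_pdb_filter : List (List String)) (sequences : List String) (H_groups : List (String × String)) (out : List (String × List String)) : Decidable (Spec_get_passed_uids failed_pdb_filter sequences H_groups out) := by unfold Spec_get_passed_uids; infer_instance

-- ===== CLAIM =====
def Claim_equal_get_passed_uids : Prop := ∀ (failed_pdb_filter : List (List String)) (sequences : List String) (H_groups : List (String × String)), Dom_get_passed_uids failed_pdb_filter sequences H_groups → Pre_get_passed_uids failed_pdb_filter sequences H_groups → Spec_get_passed_uids failed_pdb_filter sequences H_groups (get_passed_uids failed_pdb_filter sequences H_groups)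

-- ===== LEMMAS AND PROOFS =====

-- A's two grouping branches collapse to one Dict.modify (on a missing key, modify inserts f([]) = [uid]).
lemma group_step_eq (d : PySem.Dict String (List String)) (hg : String) (uid : String) :
    (if !((PySem.Dict.keys d).contains hg) then d.insert hg [uid]
     else d.modify hg [] (· ++ [uid])) = d.modify hg [] (· ++ [uid]) := by
  by_cases h : (PySem.Dict.keys d).contains hg = true
  · simp only [h, Bool.not_true, Bool.false_eq_true, if_false]
  · have hc : d.contains hg = false := by
      simpa [PySem.Dict.contains_eq_decide_mem_keys, List.contains_iff_mem] using h
    simp only [h, Bool.not_eq_eq_eq_not, Bool.not_true, if_pos, PySem.Dict.modify]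
    rw [PySem.Dict.getD_of_not_contains d [] hc, List.nil_append]

-- Characterisation of A's grouping loop over a list l with key function k:
-- its items are the distinct keys in first-appearance order, each paired with the
-- sublist of l carrying that key.
lemma group_fold_items (l : List String) (k : String → String) :
    (l.foldl (fun (d : PySem.Dict String (List String)) uid =>
        d.modify (k uid) [] (· ++ [uid])) PySem.Dict.empty).items
    = (PySem.Set.ofList (l.map k)).map
        (fun g => (g, l.filter (fun uid => k uid == g))) := by
  set D := l.foldl (fun (d : PySem.Dict String (List String)) uid =>
      d.modify (k uid) [] (· ++ [uid])) PySem.Dict.empty with hD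
  have hnd : D.keys.Nodup := by
    exact PySem.Dict.nodup_keys_foldl_modify_key l k [] (fun _ uid => (· ++ [uid]))
      PySem.Dict.empty PySem.Dict.nodup_keys_empty
  have hkeys : D.keys = PySem.Set.ofList (l.map k) := by
    rw [hD, PySem.Dict.keys_foldl_modify_key, PySem.Dict.keys_empty,
      PySem.Set.update_nil_left]
  have hval : ∀ g, D.getD g [] = l.filter (fun uid => k uid == g) := by
    intro g
    have hfold : D = (l.map (fun uid => (k uid, uid))).foldl
        (fun (d : PySem.Dict String (List String)) p => d.modify p.1 [] (· ++ [p.2]))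
        PySem.Dict.empty := by
      rw [hD, List.foldl_map]
    rw [hfold, PySem.Dict.getD_foldl_modify_append, PySem.Dict.getD_empty, List.nil_append,
      List.filter_map, List.map_map]
    simp [Function.comp_def]
  rw [PySem.Dict.items_eq_map_keys D hnd ([] : List String), hkeys]
  exact List.map_congr_left (fun g _ => by rw [hval g])

-- B's key-order loop is Set.ofList of the survivors' keys.
lemma key_order_eq (failed : List String) (seqs : List String) (k : String → String) :
    seqs.foldl (fun (ks : List String) uid =>
        if !(failed.contains uid) then
          (if !(ks.contains (k uid)) then ks ++ [k uid] else ks)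
        else ks) []
    = PySem.Set.ofList ((seqs.filter (fun uid => !(failed.contains uid))).map k) := by
  have hstep : (fun (ks : List String) uid =>
        if !(failed.contains uid) then
          (if !(ks.contains (k uid)) then ks ++ [k uid] else ks)
        else ks)
      = (fun ks uid => if (!(failed.contains uid)) = true then PySem.Set.add ks (k uid) else ks) := by
    funext ks uid
    by_cases h : uid ∈ failed
    · simp [h]
    · rw [PySem.Set.add_eq_ite]
      by_cases h2 : k uid ∈ ks <;> simp [h, h2]
  rw [hstep, PySem.List.foldl_if_eq_foldl_filter,
    ← PySem.Set.update_map_eq_foldl_add, PySem.Set.update_nil_left]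

-- ===== VERDICT =====
theorem get_passed_uids_spec : Claim_equal_get_passed_uids := by
  intro fpf seqs hg _ _
  unfold Spec_get_passed_uids get_passed_uids get_passed_uids_alt
  set failed := PySem.List.pyGetD fpf 0 [] with hf
  -- rewrite A's filter pass as List.filter
  have hpass : seqs.foldl (fun acc uid => if failed.contains uid then acc else acc ++ [uid]) []
      = seqs.filter (fun uid => !(failed.contains uid)) := by
    have h1 : (fun (acc : List String) uid => if failed.contains uid then acc else acc ++ [uid])
        = (fun acc uid => if !(failed.contains uid) then acc ++ [uid] else acc) := by
      funext acc uid; cases failed.contains uid <;> simp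
    rw [h1, PySem.List.foldl_append_if_eq_filter, List.nil_append]
  simp only [hpass, key_order_eq]
  -- collapse A's two grouping branches into one Dict.modify
  rw [show (fun (d : PySem.Dict String (List String)) uid =>
        if !((PySem.Dict.keys d).contains ((PySem.Dict.mk hg).getD uid "")) then
          d.insert ((PySem.Dict.mk hg).getD uid "") [uid]
        else d.modify ((PySem.Dict.mk hg).getD uid "") [] (· ++ [uid]))
      = (fun d uid => d.modify ((PySem.Dict.mk hg).getD uid "") [] (· ++ [uid]))
    from funext fun d => funext fun uid => group_step_eq d ((PySem.Dict.mk hg).getD uid "") uid]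
  rw [group_fold_items (seqs.filter (fun uid => !(failed.contains uid)))
      (fun uid => (PySem.Dict.mk hg).getD uid "")]
  -- per-group: filtering survivors = one combined filter over sequences
  refine List.map_congr_left fun g _ => ?_
  simp [List.filter_filter, Bool.and_comm]
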